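-- pv_equiv track=rewrite | github.com/Lingsss1/GenRec-SID | phase4_sid_generation.py | build_flat_trie
-- ===== SOURCE A (Python) =====
-- from collections import defaultdict
--
-- def build_flat_trie(sid_mapping: dict, n_levels: int = 3) -> dict:
--     """
--     构建扁平 dict Trie，支持任意层数。
--
--     输入 sid_mapping: { asin: ["<a_3>","<b_12>","<c_7>"] }   (token 列表)
--     输出: { str(prefix_tuple): sorted_list_of_next_tokens }
--     例：
--       {"()"         : ["<a_0>","<a_1>",...]  }  Level 0 根节点
--       {"('<a_3>',)" : ["<b_5>","<b_12>",...]  }  Level 1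
--       {"('<a_3>', '<b_12>')" : ["<c_7>"]      }  Level 2 叶子
--
--     与 MiniOneRec evaluate.py 中 hash_dict 的 get_hash 语义对应：
--       get_hash(x) = '-'.join([str(_) for _ in x])
--     这里用 str(tuple) 作 key，Phase 6 LogitsProcessor 按相同格式查询即可。
--     """
--     flat_trie: dict[str, set] = defaultdict(set)
--
--     for asin, tokens in sid_mapping.items():
--         if len(tokens) != n_levels:
--             continue
--         for level in range(n_levels):
--             prefix_key = str(tuple(tokens[:level]))   # "()" / "('<a_3>',)" / ...
--             flat_trie[prefix_key].add(tokens[level])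
--
--     return {k: sorted(v) for k, v in flat_trie.items()}
-- ===== SOURCE B (Python) =====
-- def build_flat_trie(sid_mapping: dict, n_levels: int = 3) -> dict:
--     # Flatten to (prefix-key, next-token) pairs once, then gather per distinct key.
--     pairs = [(str(tuple(t[:l])), t[l])
--              for t in sid_mapping.values() if len(t) == n_levels
--              for l in range(n_levels)]
--     keys = list(dict.fromkeys(k for k, _ in pairs))
--     return {k: sorted({tok for key, tok in pairs if key == k}) for k in keys}
-- ===== Notes on version B (the rewrite author's own statement) =====
-- stated objective: alternative
-- what changed: B flattens the mapping into one (prefix-key, next-token) pair list, takes the ordered dedup of the keys, and builds each entry by a per-key gather over the pair list, instead of A's incremental defaultdict-of-sets double loop.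
import Mathlib
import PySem

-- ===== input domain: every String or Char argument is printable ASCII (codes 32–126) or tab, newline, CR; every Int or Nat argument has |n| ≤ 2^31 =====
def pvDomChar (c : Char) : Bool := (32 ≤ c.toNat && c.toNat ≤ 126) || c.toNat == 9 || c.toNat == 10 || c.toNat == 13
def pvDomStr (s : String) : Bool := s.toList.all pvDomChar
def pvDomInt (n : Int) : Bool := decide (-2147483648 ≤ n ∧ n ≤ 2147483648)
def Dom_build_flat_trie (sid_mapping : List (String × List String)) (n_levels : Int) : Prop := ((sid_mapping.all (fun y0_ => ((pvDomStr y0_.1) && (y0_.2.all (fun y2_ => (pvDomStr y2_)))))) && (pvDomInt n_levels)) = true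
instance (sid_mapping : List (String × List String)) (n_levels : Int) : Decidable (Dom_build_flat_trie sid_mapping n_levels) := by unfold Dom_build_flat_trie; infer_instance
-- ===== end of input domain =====

-- B flattens the mapping into the (prefix-key, next-token) pair list once and then builds each
-- dict entry by a per-distinct-key gather, instead of A's incremental defaultdict-of-sets loop
-- (objective: alternative decomposition, not faster).

-- shared primitive: Python's str(tuple_of_strings), exact on printable ASCII + tab/newline/CR
-- (repr of a str: backslash/tab/newline/CR escaped; quote is ' unless the string contains ' and no ")
def pvReprChar (q : Char) (c : Char) : List Char :=
  if c = '\\' then ['\\', '\\']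
  else if c = '\t' then ['\\', 't']
  else if c = '\n' then ['\\', 'n']
  else if c = '\r' then ['\\', 'r']
  else if c = q then ['\\', q]
  else [c]

def pvReprStr (s : String) : String :=
  let cs := s.toList
  let q : Char := if cs.contains '\'' && !(cs.contains '"') then '"' else '\''
  String.ofList ([q] ++ cs.flatMap (pvReprChar q) ++ [q])

def pvKey (pfx : List String) : String :=
  match pfx with
  | [] => "()"
  | [x] => "(" ++ pvReprStr x ++ ",)"
  | _ => "(" ++ String.intercalate ", " (pfx.map pvReprStr) ++ ")"

-- ===== PORT A =====
-- literal port: outer loop over items, skip rows of the wrong length, inner loop over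
-- range(n_levels) mutating a defaultdict(set); finally sort each set.
-- tokens[level] is ported with pyGetD with an unreachable default: 0 ≤ level < n_levels = len(tokens).
def build_flat_trie (sid_mapping : List (String × List String)) (n_levels : Int) : List (String × List String) :=
  let flat_trie : PySem.Dict String (PySem.Set String) :=
    sid_mapping.foldl (fun d kv =>
      let tokens := kv.2
      if (tokens.length : Int) == n_levels then
        (PySem.List.pyRange 0 n_levels 1).foldl (fun d level =>
          let prefix_key := pvKey (PySem.List.slice tokens none (some level))
          d.modify prefix_key [] (fun s => PySem.Set.add s (PySem.List.pyGetD tokens level ""))) d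
      else d) PySem.Dict.empty
  flat_trie.items.map (fun kv => (kv.1, PySem.List.sorted kv.2 (fun x => x) false))

-- ===== PORT B =====
-- port of Source B: the flattened pair list, ordered-dedup of its keys (dict.fromkeys), then a
-- per-key gather (filter + set + sorted).  t[l] via pyGetD, default unreachable as above.
def build_flat_trie_alt (sid_mapping : List (String × List String)) (n_levels : Int) : List (String × List String) :=
  let pairs : List (String × String) :=
    ((sid_mapping.map (·.2)).filter (fun t => (t.length : Int) == n_levels)).flatMap
      (fun t => (PySem.List.pyRange 0 n_levels 1).map (fun l =>
        (pvKey (PySem.List.slice t none (some l)), PySem.List.pyGetD t l "")))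
  let keys := PySem.List.dedup (pairs.map (·.1))
  keys.map (fun k =>
    (k, PySem.List.sorted (PySem.Set.ofList ((pairs.filter (fun p => p.1 == k)).map (·.2))) (fun x => x) false))

-- ===== PRECONDITION & SPEC =====
def Spec_build_flat_trie (sid_mapping : List (String × List String)) (n_levels : Int) (out : List (String × List String)) : Prop := out = build_flat_trie_alt sid_mapping n_levels
instance (sid_mapping : List (String × List String)) (n_levels : Int) (out : List (String × List String)) : Decidable (Spec_build_flat_trie sid_mapping n_levels out) := by unfold Spec_build_flat_trie; infer_instance

-- ===== CLAIM (what is proved, stated in full; the proofs are below) =====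
def Claim_equal_build_flat_trie : Prop := ∀ (sid_mapping : List (String × List String)) (n_levels : Int), Dom_build_flat_trie sid_mapping n_levels → Spec_build_flat_trie sid_mapping n_levels (build_flat_trie sid_mapping n_levels)

-- ===== LEMMAS AND PROOFS =====

-- the grouping step shared by the proofs
def pvStep (d : PySem.Dict String (PySem.Set String)) (p : String × String) : PySem.Dict String (PySem.Set String) :=
  d.modify p.1 [] (fun s => PySem.Set.add s p.2)

-- the per-row pair list of B, and B's full pair list
def pvRowPairs (n_levels : Int) (t : List String) : List (String × String) :=
  (PySem.List.pyRange 0 n_levels 1).map (fun l =>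
    (pvKey (PySem.List.slice t none (some l)), PySem.List.pyGetD t l ""))

def pvPairs (sid_mapping : List (String × List String)) (n_levels : Int) : List (String × String) :=
  ((sid_mapping.map (·.2)).filter (fun t => (t.length : Int) == n_levels)).flatMap (pvRowPairs n_levels)

-- Step 1: A's double loop is the fold of the grouping step over the flattened pair list
theorem pv_fold_flat (n_levels : Int) (l : List (String × List String))
    (d : PySem.Dict String (PySem.Set String)) :
    l.foldl (fun d kv =>
      if ((kv.2.length : Int) == n_levels) then
        (PySem.List.pyRange 0 n_levels 1).foldl (fun d level =>
          d.modify (pvKey (PySem.List.slice kv.2 none (some level))) []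
            (fun s => PySem.Set.add s (PySem.List.pyGetD kv.2 level ""))) d
      else d) d
    = (pvPairs l n_levels).foldl pvStep d := by
  induction l generalizing d with
  | nil => rfl
  | cons kv t ih =>
    simp only [List.foldl_cons, pvPairs, List.map_cons, List.filter_cons]
    cases h : ((kv.2.length : Int) == n_levels) with
    | false => simpa [h, pvPairs] using ih _
    | true =>
      simp only [if_true, List.flatMap_cons, List.foldl_append]
      rw [show (pvRowPairs n_levels kv.2).foldl pvStep d
            = (PySem.List.pyRange 0 n_levels 1).foldl (fun d level =>
                d.modify (pvKey (PySem.List.slice kv.2 none (some level))) []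
                  (fun s => PySem.Set.add s (PySem.List.pyGetD kv.2 level ""))) d
          from by rw [pvRowPairs, List.foldl_map]; rfl]
      simpa [pvPairs] using ih _

-- Step 3 helper: getD of the modify/Set.add loop, characterised
theorem pv_getD_foldl_modify_setAdd (l : List (String × String)) (d : PySem.Dict String (PySem.Set String)) (c : String) :
    (l.foldl pvStep d).getD c []
      = PySem.Set.update (d.getD c []) ((l.filter (fun p => p.1 == c)).map (·.2)) := by
  induction l generalizing d with
  | nil => rfl
  | cons p t ih =>
    simp only [List.foldl_cons, ih, List.filter_cons]
    by_cases h : p.1 = c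
    · simp [pvStep, h, PySem.Set.update]
    · simp [pvStep, PySem.Dict.getD_modify, Ne.symm h, h]

-- ===== VERDICT =====
theorem build_flat_trie_spec : Claim_equal_build_flat_trie := by
  intro sid_mapping n_levels _
  show build_flat_trie sid_mapping n_levels = build_flat_trie_alt sid_mapping n_levels
  simp only [build_flat_trie, build_flat_trie_alt]
  rw [pv_fold_flat]
  have hnodup : ((pvPairs sid_mapping n_levels).foldl pvStep PySem.Dict.empty).keys.Nodup := by
    simpa [pvStep] using
      PySem.Dict.nodup_keys_foldl_modify_key (pvPairs sid_mapping n_levels)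
        (fun p : String × String => p.1) []
        (fun _ (p : String × String) (s : PySem.Set String) => PySem.Set.add s p.2)
        PySem.Dict.empty (by simp)
  have hkeys : ((pvPairs sid_mapping n_levels).foldl pvStep PySem.Dict.empty).keys
      = PySem.Set.ofList ((pvPairs sid_mapping n_levels).map (·.1)) := by
    have := PySem.Dict.keys_foldl_modify_key (l := pvPairs sid_mapping n_levels)
        (key := fun p : String × String => p.1) (d0 := [])
        (f := fun _ (p : String × String) (s : PySem.Set String) => PySem.Set.add s p.2)
        (d := PySem.Dict.empty)
    simpa [pvStep, PySem.Dict.keys_empty, PySem.Set.update_nil_left] using this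
  rw [PySem.Dict.items_eq_map_keys _ hnodup [], hkeys, List.map_map]
  show _ = (PySem.List.dedup (((pvPairs sid_mapping n_levels)).map (·.1))).map _
  rw [← PySem.List.dedup_eq_ofList]
  apply List.map_congr_left
  intro k _
  simp only [Function.comp_apply]
  rw [pv_getD_foldl_modify_setAdd, PySem.Dict.getD_empty, PySem.Set.update_nil_left]
  rfl
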